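-- pv_equiv track=rewrite | github.com/zaja/SyncBackup | app/windows_service.py | _group_incremental_backups_into_chains
-- ===== SOURCE A (Python) =====
-- def _group_incremental_backups_into_chains(backup_files):
--     """Group incremental backups into chains"""
--     chains = []
--     current_chain = []
--
--     # Sort by created_at
--     sorted_backups = sorted(backup_files, key=lambda x: x['created_at'])
--
--     for backup in sorted_backups:
--         if backup['file_type'] == 'incremental_inicial':
--             if current_chain:
--                 chains.append(current_chain)
--             current_chain = [backup]
--         elif backup['file_type'] == 'incremental':
--             current_chain.append(backup)
--
--     if current_chain:
--         chains.append(current_chain)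
--
--     return chains
-- ===== SOURCE B (Python) =====
-- def _group_incremental_backups_into_chains(backup_files):
--     """Group incremental backups into chains (split-at-initial decomposition)."""
--     relevant = [b for b in sorted(backup_files, key=lambda x: x['created_at'])
--                 if b['file_type'] in ('incremental_inicial', 'incremental')]
--     return _split_chains(relevant)
--
--
-- def _split_chains(xs):
--     """Head element starts a chain; it runs until the next 'incremental_inicial'."""
--     if not xs:
--         return []
--     tail = xs[1:]
--     i = 0
--     while i < len(tail) and tail[i]['file_type'] != 'incremental_inicial':
--         i += 1
--     return [[xs[0]] + tail[:i]] + _split_chains(tail[i:])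
-- ===== Notes on version B (the rewrite author's own statement) =====
-- stated objective: alternative
-- what changed: A's single pass with a (chains, current_chain) accumulator is replaced by filtering the sorted list to the two relevant file_types and recursively splitting it into segments at each 'incremental_inicial' marker.
import Mathlib
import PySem

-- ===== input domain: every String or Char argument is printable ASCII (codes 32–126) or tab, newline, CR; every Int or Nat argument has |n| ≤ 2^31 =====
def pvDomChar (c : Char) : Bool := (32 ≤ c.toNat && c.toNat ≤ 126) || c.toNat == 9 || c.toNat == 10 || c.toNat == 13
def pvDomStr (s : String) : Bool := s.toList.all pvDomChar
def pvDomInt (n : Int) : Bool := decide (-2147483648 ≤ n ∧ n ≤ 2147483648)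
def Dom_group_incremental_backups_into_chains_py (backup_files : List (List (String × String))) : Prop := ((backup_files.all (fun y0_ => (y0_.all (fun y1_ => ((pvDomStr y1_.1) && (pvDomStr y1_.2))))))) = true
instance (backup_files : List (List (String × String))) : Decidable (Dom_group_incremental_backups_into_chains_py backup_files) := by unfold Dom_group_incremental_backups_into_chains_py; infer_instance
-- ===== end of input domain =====

-- B replaces A's accumulator loop by filter-then-recursive-split at 'incremental_inicial' markers (objective: alternative decomposition, same cost).

-- ===== PORT A =====
-- dict access d['k']: first matching key; Pre_ guarantees the key is present, so the "" default is unreachable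
def pvGetD (b : List (String × String)) (k : String) : String :=
  ((b.find? (fun p => p.1 == k)).map Prod.snd).getD ""

-- the body of A's for-loop, state = (chains, current_chain)
def pvStepA (s : List (List (List (String × String))) × List (List (String × String)))
    (backup : List (String × String)) :
    List (List (List (String × String))) × List (List (String × String)) :=
  if pvGetD backup "file_type" == "incremental_inicial" then
    ((if s.2 ≠ [] then s.1 ++ [s.2] else s.1), [backup])
  else if pvGetD backup "file_type" == "incremental" then
    (s.1, s.2 ++ [backup])
  else s

def group_incremental_backups_into_chains_py (backup_files : List (List (String × String))) : List (List (List (String × String))) :=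
  let sorted_backups := PySem.List.sorted backup_files (fun x => pvGetD x "created_at")
  let r := sorted_backups.foldl pvStepA ([], [])
  if r.2 ≠ [] then r.1 ++ [r.2] else r.1

-- ===== PORT B =====
def pvRelevant (b : List (String × String)) : Bool :=
  pvGetD b "file_type" == "incremental_inicial" || pvGetD b "file_type" == "incremental"

def pvNotInit (b : List (String × String)) : Bool :=
  pvGetD b "file_type" != "incremental_inicial"

-- _split_chains: head starts a chain that runs until the next 'incremental_inicial'
def pvSplitChains : List (List (String × String)) → List (List (List (String × String)))
  | [] => []
  | h :: t => (h :: t.takeWhile pvNotInit) :: pvSplitChains (t.dropWhile pvNotInit)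
  termination_by xs => xs.length
  decreasing_by
    exact Nat.lt_succ_of_le (List.length_dropWhile_le _ _)

def group_incremental_backups_into_chains_py_alt (backup_files : List (List (String × String))) : List (List (List (String × String))) :=
  pvSplitChains ((PySem.List.sorted backup_files (fun x => pvGetD x "created_at")).filter pvRelevant)

-- ===== PRECONDITION & SPEC =====
-- Python A raises KeyError when a backup dict lacks 'created_at' or 'file_type'; Pre_ excludes exactly those inputs.
def Pre_group_incremental_backups_into_chains_py (backup_files : List (List (String × String))) : Prop :=
  (backup_files.all (fun b => ((b.find? (fun p => p.1 == "created_at")).isSome && (b.find? (fun p => p.1 == "file_type")).isSome))) = true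
-- (Pre_ is about the presence of the keys only: any "file_type" value — "incremental_inicial", say — is accepted by A; unknown types are simply ignored)
instance (backup_files : List (List (String × String))) : Decidable (Pre_group_incremental_backups_into_chains_py backup_files) := by unfold Pre_group_incremental_backups_into_chains_py; infer_instance

def pvWitness_group_incremental_backups_into_chains_py : (List (List (String × String))) :=
  [[("created_at", "2020"), ("file_type", "incremental_inicial")],
   [("created_at", "2021"), ("file_type", "incremental")]]

def Spec_group_incremental_backups_into_chains_py (backup_files : List (List (String × String))) (out : List (List (List (String × String)))) : Prop := out = group_incremental_backups_into_chains_py_alt backup_files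
instance (backup_files : List (List (String × String))) (out : List (List (List (String × String)))) : Decidable (Spec_group_incremental_backups_into_chains_py backup_files out) := by unfold Spec_group_incremental_backups_into_chains_py; infer_instance

-- ===== CLAIM (what is proved, stated in full; the proofs are below) =====
def Claim_equal_group_incremental_backups_into_chains_py : Prop := ∀ (backup_files : List (List (String × String))), Dom_group_incremental_backups_into_chains_py backup_files → Pre_group_incremental_backups_into_chains_py backup_files → Spec_group_incremental_backups_into_chains_py backup_files (group_incremental_backups_into_chains_py backup_files)

-- ===== LEMMAS AND PROOFS =====

-- A's loop ignores entries whose file_type is neither kind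
theorem pv_foldl_skip (ys : List (List (String × String)))
    (s : List (List (List (String × String))) × List (List (String × String))) :
    ys.foldl pvStepA s = (ys.filter pvRelevant).foldl pvStepA s := by
  induction ys generalizing s with
  | nil => rfl
  | cons b t ih =>
    by_cases hr : pvRelevant b = true
    · simp [hr, List.foldl_cons, ih]
    · have h1 : (pvGetD b "file_type" == "incremental_inicial") = false := by
        simp [pvRelevant] at hr; simp [hr.1]
      have h2 : (pvGetD b "file_type" == "incremental") = false := by
        simp [pvRelevant] at hr; simp [hr.2]
      simp [hr, List.foldl_cons, pvStepA, h1, h2, ih]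

def pvFinalize (r : List (List (List (String × String))) × List (List (String × String))) :
    List (List (List (String × String))) :=
  if r.2 ≠ [] then r.1 ++ [r.2] else r.1

-- invariant of A's loop on a list of relevant entries, phrased via B's split
theorem pv_loop_split (ys : List (List (String × String)))
    (h : ∀ b ∈ ys, pvRelevant b = true) :
    ∀ (chains : List (List (List (String × String)))) (cur : List (List (String × String))),
    pvFinalize (ys.foldl pvStepA (chains, cur)) =
      chains ++ (if cur ++ ys.takeWhile pvNotInit = [] then [] else [cur ++ ys.takeWhile pvNotInit])
        ++ pvSplitChains (ys.dropWhile pvNotInit) := by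
  induction ys with
  | nil =>
    intro chains cur
    by_cases hc : cur = [] <;> simp [pvFinalize, pvSplitChains, hc]
  | cons b t ih =>
    intro chains cur
    have hb := h b (List.mem_cons_self ..)
    have ht : ∀ x ∈ t, pvRelevant x = true := fun x hx => h x (List.mem_cons_of_mem _ hx)
    by_cases hi : (pvGetD b "file_type" == "incremental_inicial") = true
    · have hni : pvNotInit b = false := by simp [pvNotInit]; simpa using hi
      rw [List.foldl_cons]
      have hstep : pvStepA (chains, cur) b = ((if cur ≠ [] then chains ++ [cur] else chains), [b]) := by
        simp [pvStepA, hi]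
      rw [hstep, ih ht]
      rw [List.takeWhile_cons, List.dropWhile_cons, hni]
      simp only [Bool.false_eq_true, if_false]
      rw [pvSplitChains]
      by_cases hc : cur = [] <;> simp [hc]
    · have hinc : (pvGetD b "file_type" == "incremental") = true := by
        have := hb; simp [pvRelevant] at this
        rcases this with h' | h' <;> simp [h'] at hi ⊢
      have hni : pvNotInit b = true := by
        simp [pvNotInit]; intro heq; rw [heq] at hi; simp at hi
      rw [List.foldl_cons]
      have hstep : pvStepA (chains, cur) b = (chains, cur ++ [b]) := by
        simp [pvStepA, hinc]
        intro h'; exact absurd (by simp [h']) hi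
      rw [hstep, ih ht]
      rw [List.takeWhile_cons, List.dropWhile_cons, hni]
      simp [List.append_assoc]

-- B's split equals the "empty accumulator" instance of the invariant's right-hand side
theorem pv_split_start (ys : List (List (String × String))) :
    (if ([] : List (List (String × String))) ++ ys.takeWhile pvNotInit = [] then [] else [([] : List (List (String × String))) ++ ys.takeWhile pvNotInit])
      ++ pvSplitChains (ys.dropWhile pvNotInit) = pvSplitChains ys := by
  cases ys with
  | nil => simp [pvSplitChains]
  | cons h t =>
    by_cases hni : pvNotInit h = true
    · rw [List.takeWhile_cons, List.dropWhile_cons]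
      simp only [hni, if_true]
      rw [pvSplitChains]
      simp
    · rw [List.takeWhile_cons, List.dropWhile_cons]
      simp [Bool.not_eq_true] at hni
      simp [hni]

-- ===== VERDICT (by name: the statement is the Claim_ definition above) =====
theorem group_incremental_backups_into_chains_py_spec : Claim_equal_group_incremental_backups_into_chains_py := by
  intro backup_files _ _
  show pvFinalize ((PySem.List.sorted backup_files (fun x => pvGetD x "created_at")).foldl pvStepA ([], [])) =
    pvSplitChains ((PySem.List.sorted backup_files (fun x => pvGetD x "created_at")).filter pvRelevant)
  rw [pv_foldl_skip]
  rw [pv_loop_split _ (fun b hb => (List.mem_filter.mp hb).2) [] []]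
  rw [List.nil_append]
  exact pv_split_start _
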